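-- pv_equiv track=rewrite | github.com/taoyds/spider | eval_exec_match.py | in_sub_sql
-- ===== SOURCE A (Python) =====
-- def in_sub_sql(idx,toks):
--     left = False
--     right_num = 0
--     for i in  range(idx-1,-1,-1):
--         if toks[i] == '(':
--             if right_num == 0:
--                 left = True
--                 break
--             else:
--                 right_num -= 1
--         if toks[i] == ')':
--             right_num += 1
--     if left:
--         left_num = 0
--         for i in  range(idx+1,len(toks),1):
--             if toks[i] == ')':
--                 if left_num == 0:
--                     return True
--                 else:
--                     left_num -= 1
--             if toks[i] == '(':
--                 left_num += 1
--     return False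
-- ===== SOURCE B (Python) =====
-- def in_sub_sql(idx, toks):
--     stack = []
--     for i, t in enumerate(toks):
--         if i == idx:
--             continue
--         if t == '(':
--             stack.append(i)
--         elif t == ')':
--             if stack:
--                 o = stack.pop()
--                 if o < idx < i:
--                     return True
--     return False
-- ===== Notes on version B (the rewrite author's own statement) =====
-- stated objective: alternative
-- what changed: Replaced A's two directional counter scans (leftwards for an unmatched '(' then rightwards for an unmatched ')') by a single left-to-right pass that maintains a stack of '(' indices, skips position idx, and reports True when a matched pair strictly encloses idx.
import Mathlib
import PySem

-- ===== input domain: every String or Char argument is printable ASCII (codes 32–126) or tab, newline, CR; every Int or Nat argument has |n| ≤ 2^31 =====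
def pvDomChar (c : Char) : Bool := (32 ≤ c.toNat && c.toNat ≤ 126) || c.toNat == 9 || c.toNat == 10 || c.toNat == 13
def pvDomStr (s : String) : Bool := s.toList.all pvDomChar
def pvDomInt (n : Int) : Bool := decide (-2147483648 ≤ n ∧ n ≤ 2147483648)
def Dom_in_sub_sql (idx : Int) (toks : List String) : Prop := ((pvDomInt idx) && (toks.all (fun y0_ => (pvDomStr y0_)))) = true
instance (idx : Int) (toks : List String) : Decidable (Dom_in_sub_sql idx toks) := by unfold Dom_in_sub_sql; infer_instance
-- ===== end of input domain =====

-- B replaces A's two directional counter scans by one left-to-right pass with a stack of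
-- '(' indices (skipping position idx), reporting whether a matched pair strictly encloses idx;
-- same O(n) cost, different algorithm (objective: alternative).

-- ===== PORT A =====
-- A's backwards loop `for i in range(idx-1,-1,-1)`: the Nat argument is the number of
-- remaining indices, the next index read is n; pyGetD is exact inside Pre_ (indices in range).
def leftRecA (toks : List String) : Nat → Int → Bool
  | 0, _ => false
  | n + 1, r =>
    let t := PySem.List.pyGetD toks (n : Int) ""
    if t = "(" then (if r = 0 then true else leftRecA toks n (r - 1))
    else if t = ")" then leftRecA toks n (r + 1)
    else leftRecA toks n r

-- A's forward loop `for i in range(idx+1,len(toks),1)` walks exactly the suffix toks[idx+1:].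
def rightRecA : List String → Int → Bool
  | [], _ => false
  | t :: ts, l =>
    if t = ")" then (if l = 0 then true else rightRecA ts (l - 1))
    else if t = "(" then rightRecA ts (l + 1)
    else rightRecA ts l

def in_sub_sql (idx : Int) (toks : List String) : Bool :=
  if leftRecA toks idx.toNat 0 then rightRecA (toks.drop (idx + 1).toNat) 0 else false

-- ===== PORT B =====
-- Source B's single loop `for i, t in enumerate(toks)` as structural recursion carrying i and the stack.
def bLoop (idx : Int) : List String → Int → List Int → Bool
  | [], _, _ => false
  | t :: ts, i, st =>
    if i = idx then bLoop idx ts (i + 1) st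
    else if t = "(" then bLoop idx ts (i + 1) (i :: st)
    else if t = ")" then
      match st with
      | [] => bLoop idx ts (i + 1) []
      | o :: st' => if o < idx ∧ idx < i then true else bLoop idx ts (i + 1) st'
    else bLoop idx ts (i + 1) st

def in_sub_sql_alt (idx : Int) (toks : List String) : Bool := bLoop idx toks 0 []

-- ===== PRECONDITION & SPEC =====
-- A raises IndexError (first backwards access toks[idx-1]) exactly when idx > len(toks).
def Pre_in_sub_sql (idx : Int) (toks : List String) : Prop := idx ≤ (toks.length : Int)
instance (idx : Int) (toks : List String) : Decidable (Pre_in_sub_sql idx toks) := by unfold Pre_in_sub_sql; infer_instance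
def pvWitness_in_sub_sql : Int × List String := (1, ["(", "x", ")"])

def Spec_in_sub_sql (idx : Int) (toks : List String) (out : Bool) : Prop := out = in_sub_sql_alt idx toks
instance (idx : Int) (toks : List String) (out : Bool) : Decidable (Spec_in_sub_sql idx toks out) := by unfold Spec_in_sub_sql; infer_instance

-- ===== CLAIM (what is proved, stated in full; the proofs are below) =====
def Claim_equal_in_sub_sql : Prop := ∀ (idx : Int) (toks : List String), Dom_in_sub_sql idx toks → Pre_in_sub_sql idx toks → Spec_in_sub_sql idx toks (in_sub_sql idx toks)

-- ===== LEMMAS AND PROOFS =====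

-- Net number of currently-unmatched '(' after scanning a prefix left-to-right (stack depth).
def stkFold : List String → Nat → Nat
  | [], n => n
  | t :: ts, n => stkFold ts (if t = "(" then n + 1 else if t = ")" then n - 1 else n)

-- Stack left by B's loop after a prefix in which every index is < idx (no skip, no hit).
def pstk : Int → List String → List Int → List Int
  | _, [], st => st
  | i, t :: ts, st => pstk (i + 1) ts (if t = "(" then i :: st else if t = ")" then st.tail else st)

theorem stkFold_append (xs ys : List String) (n : Nat) :
    stkFold (xs ++ ys) n = stkFold ys (stkFold xs n) := by
  induction xs generalizing n with
  | nil => rfl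
  | cons t ts ih => simp [stkFold, ih]

-- A's backwards scan decides "the prefix toks[:n] has more than r unmatched '('".
theorem leftRecA_eq (toks : List String) (n : Nat) (hn : n ≤ toks.length) (r : Int) (hr : 0 ≤ r) :
    leftRecA toks n r = decide ((stkFold (toks.take n) 0 : Int) > r) := by
  induction n generalizing r with
  | zero => simp [leftRecA, stkFold]; omega
  | succ n ih =>
    have hlen : n < toks.length := by omega
    have htake : toks.take (n + 1) = toks.take n ++ [toks[n]] := by
      rw [List.take_add_one]
      simp [List.getElem?_eq_getElem hlen]
    rw [htake, stkFold_append]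
    have hget : PySem.List.pyGetD toks (n : Int) "" = toks[n] := by
      rw [PySem.List.pyGetD_natCast]
      exact List.getD_eq_getElem toks "" hlen
    simp only [leftRecA, hget, stkFold]
    split_ifs with h1 h2 h3
    · rw [eq_comm, decide_eq_true_eq]; omega
    · rw [ih (by omega) (r - 1) (by omega), decide_eq_decide]; omega
    · rw [ih (by omega) (r + 1) (by omega), decide_eq_decide]; omega
    · exact ih (by omega) r hr

-- B's loop returns false when every stack entry exceeds idx and so do all remaining indices.
theorem bLoop_false (idx : Int) (ts : List String) (i : Int) (st : List Int)
    (hi : idx < i) (hst : ∀ o ∈ st, idx < o) : bLoop idx ts i st = false := by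
  induction ts generalizing i st with
  | nil => simp [bLoop]
  | cons t ts ih =>
    simp only [bLoop]
    rw [if_neg (by omega : ¬ i = idx)]
    rcases eq_or_ne t "(" with h1 | h1
    · rw [if_pos h1]
      refine ih (i + 1) (i :: st) (by omega) ?_
      intro o ho
      rcases List.mem_cons.1 ho with h | h
      · omega
      · exact hst o h
    · rcases eq_or_ne t ")" with h2 | h2
      · rw [if_neg h1, if_pos h2]
        cases st with
        | nil => exact ih (i + 1) [] (by omega) (by simp)
        | cons o st' =>
          have hno : ¬ (o < idx ∧ idx < i) := by
            have := hst o (List.mem_cons_self)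
            omega
          simp only [if_neg hno]
          exact ih (i + 1) st' (by omega) (fun x hx => hst x (List.mem_cons_of_mem o hx))
      · rw [if_neg h1, if_neg h2]
        exact ih (i + 1) st (by omega) hst

-- Past idx, B's loop with stack high ++ low (high new/above idx, low old/below idx, low ≠ [])
-- behaves exactly like A's forward counter scan with counter |high|.
theorem bLoop_right (idx : Int) (ts : List String) (i : Int) (high low : List Int)
    (hi : idx < i) (hhigh : ∀ h ∈ high, idx < h) (hlow : ∀ o ∈ low, o < idx) (hne : low ≠ []) :
    bLoop idx ts i (high ++ low) = rightRecA ts (high.length : Int) := by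
  induction ts generalizing i high with
  | nil => simp [bLoop, rightRecA]
  | cons t ts ih =>
    simp only [bLoop, rightRecA]
    rw [if_neg (by omega : ¬ i = idx)]
    rcases eq_or_ne t "(" with h1 | h1
    · rw [if_pos h1, if_neg (by rw [h1]; decide : ¬ t = ")"), if_pos h1]
      have : (i :: (high ++ low)) = (i :: high) ++ low := rfl
      rw [this, ih (i + 1) (i :: high) (by omega)
        (by intro h hh; rcases List.mem_cons.1 hh with h' | h'; omega; exact hhigh h h')]
      simp only [List.length_cons]
      push_cast
      ring
    · rcases eq_or_ne t ")" with h2 | h2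
      · rw [if_neg h1, if_pos h2, if_pos h2]
        cases high with
        | nil =>
          cases low with
          | nil => exact absurd rfl hne
          | cons o low' =>
            simp only [List.nil_append, if_pos (And.intro (hlow o List.mem_cons_self) hi)]
            norm_num
        | cons h high' =>
          have hh : idx < h := hhigh h List.mem_cons_self
          simp only [List.cons_append, if_neg (show ¬ (h < idx ∧ idx < i) by omega)]
          rw [ih (i + 1) high' (by omega) (fun x hx => hhigh x (List.mem_cons_of_mem h hx))]
          rw [if_neg (show ¬ ((h :: high').length : Int) = 0 by
            simp only [List.length_cons]; push_cast; omega)]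
          congr 1
          simp only [List.length_cons]
          push_cast
          ring
      · rw [if_neg h1, if_neg h2, if_neg h2, if_neg h1]
        exact ih (i + 1) high (by omega) hhigh

-- Before idx, B's loop only evolves the stack: prefix composition.
theorem bLoop_prefix (idx : Int) (ts rest : List String) (i : Int) (st : List Int)
    (h : i + (ts.length : Int) ≤ idx) :
    bLoop idx (ts ++ rest) i st = bLoop idx rest (i + ts.length) (pstk i ts st) := by
  induction ts generalizing i st with
  | nil => simp [pstk]
  | cons t ts ih =>
    have hlt : i < idx := by
      simp only [List.length_cons] at h
      push_cast at h
      omega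
    have harith : i + ((t :: ts).length : Int) = (i + 1) + (ts.length : Int) := by
      simp only [List.length_cons]
      push_cast
      ring
    have hrec : i + ((t :: ts).length : Int) ≤ idx := h
    simp only [List.cons_append, bLoop, pstk]
    rw [if_neg (by omega : ¬ i = idx), harith]
    rcases eq_or_ne t "(" with h1 | h1
    · rw [if_pos h1, if_pos h1, ih (i + 1) (i :: st) (by rw [← harith]; exact h)]
    · rcases eq_or_ne t ")" with h2 | h2
      · rw [if_neg h1, if_pos h2, if_neg h1, if_pos h2]
        cases st with
        | nil => exact ih (i + 1) [] (by rw [← harith]; exact h)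
        | cons o st' =>
          simp only [if_neg (show ¬ (o < idx ∧ idx < i) by omega)]
          exact ih (i + 1) st' (by rw [← harith]; exact h)
      · rw [if_neg h1, if_neg h2, if_neg h1, if_neg h2]
        exact ih (i + 1) st (by rw [← harith]; exact h)

theorem pstk_lt (idx : Int) (ts : List String) (i : Int) (st : List Int)
    (h : i + (ts.length : Int) ≤ idx) (hst : ∀ o ∈ st, o < idx) :
    ∀ o ∈ pstk i ts st, o < idx := by
  induction ts generalizing i st with
  | nil => exact hst
  | cons t ts ih =>
    have hlt : i < idx := by
      simp only [List.length_cons] at h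
      push_cast at h
      omega
    have h' : (i + 1) + (ts.length : Int) ≤ idx := by
      simp only [List.length_cons] at h
      push_cast at h ⊢
      omega
    simp only [pstk]
    refine ih (i + 1) _ h' ?_
    intro o ho
    split_ifs at ho with h1 h2
    · rcases List.mem_cons.1 ho with h3 | h3
      · omega
      · exact hst o h3
    · exact hst o ((List.tail_sublist st).subset ho)
    · exact hst o ho

theorem pstk_length (ts : List String) (i : Int) (st : List Int) :
    (pstk i ts st).length = stkFold ts st.length := by
  induction ts generalizing i st with
  | nil => rfl
  | cons t ts ih =>
    simp only [pstk, stkFold]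
    rw [ih]
    split_ifs with h1 h2 <;> simp [List.length_tail]

-- ===== VERDICT (by name: the statement is the Claim_ definition above) =====
theorem in_sub_sql_spec : Claim_equal_in_sub_sql := by
  intro idx toks _ hpre
  unfold Spec_in_sub_sql in_sub_sql in_sub_sql_alt
  unfold Pre_in_sub_sql at hpre
  by_cases hneg : idx < 0
  · -- idx < 0: both sides are false
    have h0 : idx.toNat = 0 := by omega
    rw [h0, bLoop_false idx toks 0 [] (by omega) (by simp)]
    simp [leftRecA]
  · -- 0 ≤ idx ≤ len
    have hpos : (0 : Int) ≤ idx := by omega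
    set n := idx.toNat with hn
    have hnlen : n ≤ toks.length := by omega
    have htklen : ((toks.take n).length : Int) = (n : Int) := by
      simp [List.length_take, min_eq_left hnlen]
    have hB : bLoop idx toks 0 [] = bLoop idx (toks.drop n) (n : Int) (pstk 0 (toks.take n) []) := by
      conv_lhs => rw [← List.take_append_drop n toks]
      rw [bLoop_prefix idx (toks.take n) (toks.drop n) 0 [] (by rw [htklen]; omega)]
      rw [zero_add, htklen]
    have hlowlt : ∀ o ∈ pstk 0 (toks.take n) [], o < idx :=
      pstk_lt idx (toks.take n) 0 [] (by rw [htklen]; omega) (by simp)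
    have hlowlen : (pstk 0 (toks.take n) []).length = stkFold (toks.take n) 0 :=
      pstk_length (toks.take n) 0 []
    rw [leftRecA_eq toks n hnlen 0 le_rfl, hB]
    rcases Nat.eq_or_lt_of_le hnlen with heq | hlt
    · -- n = toks.length: nothing to the right of idx, both sides false
      have hd1 : toks.drop n = [] := by rw [heq, List.drop_length]
      have hd2 : toks.drop (idx + 1).toNat = [] := List.drop_eq_nil_of_le (by omega)
      rw [hd1, hd2]
      simp [bLoop, rightRecA]
    · have hdrop : toks.drop n = toks[n] :: toks.drop (n + 1) := List.drop_eq_getElem_cons hlt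
      have h2 : (idx + 1).toNat = n + 1 := by omega
      rw [hdrop, h2]
      simp only [bLoop]
      rw [if_pos (by omega : (n : Int) = idx)]
      rcases heq : pstk 0 (toks.take n) [] with _ | ⟨o, low'⟩
      · -- empty stack after the prefix: no unmatched '(' left of idx
        rw [bLoop_false idx _ ((n : Int) + 1) [] (by omega) (by simp)]
        have hz : stkFold (toks.take n) 0 = 0 := by rw [← hlowlen, heq]; rfl
        rw [hz]
        norm_num
      · -- unmatched '(' left of idx: both sides scan the suffix for an unmatched ')'
        rw [heq] at hlowlt
        have hr := bLoop_right idx (List.drop (n + 1) toks) ((n : Int) + 1) [] (o :: low')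
          (by omega) (by simp) hlowlt (by simp)
        simp only [List.nil_append] at hr
        rw [hr]
        have hgt : (0 : Int) < (stkFold (toks.take n) 0 : Int) := by
          rw [← hlowlen, heq]
          simp
        rw [if_pos (decide_eq_true (by omega : (stkFold (toks.take n) 0 : Int) > 0))]
        norm_num
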